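-- pv_equiv track=rewrite | github.com/codingsanji/random-programs | Python/crash-course/module3.py | odd_numbers
-- ===== SOURCE A (Python) =====
-- def odd_numbers(maximum):
--
--     return_string = "" # Initializes variable as a string
--
--     # Complete the for loop with a range that includes all
--     # odd numbers up to and including the "maximum" value.
--     for i in range (0,maximum+1):
--         if i%2!=0 :
--             return_string += str(i)
--             i+=1
--         else:
--             return_string += " "
--             i+=1
--         # Complete the body of the loop by appending the odd number
--         # followed by a space to the "return_string" variable.
--
--     # This .strip command will remove the final " " space
--     # at the end of the "return_string".
--     return return_string.strip()
-- ===== SOURCE B (Python) =====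
-- def odd_numbers(maximum):
--     return " ".join(str(i) for i in range(1, maximum + 1, 2))
-- ===== Notes on version B (the rewrite author's own statement) =====
-- stated objective: idiomatic
-- what changed: Iterates only the odd numbers with a stride-2 range and combines them with ' '.join, instead of visiting every integer with a parity branch that emits a space for each even number and stripping the trailing space at the end.
import Mathlib
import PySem

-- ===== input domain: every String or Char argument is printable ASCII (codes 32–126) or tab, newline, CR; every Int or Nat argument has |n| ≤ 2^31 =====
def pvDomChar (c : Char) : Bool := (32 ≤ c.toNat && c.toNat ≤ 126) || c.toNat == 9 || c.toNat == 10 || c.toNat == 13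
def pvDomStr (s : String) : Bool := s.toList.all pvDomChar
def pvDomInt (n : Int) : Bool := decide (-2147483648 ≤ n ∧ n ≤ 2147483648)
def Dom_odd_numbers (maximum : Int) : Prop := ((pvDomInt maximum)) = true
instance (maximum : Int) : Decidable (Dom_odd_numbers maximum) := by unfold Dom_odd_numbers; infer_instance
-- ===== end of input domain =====

-- B iterates only the odd numbers (stride-2 range) and combines them with ' '.join,
-- instead of A's walk over every integer with a parity branch plus a final strip (idiomatic rewrite).

-- ===== PORT A =====
def odd_numbers (maximum : Int) : String :=
  let return_string : String :=
    (PySem.List.pyRange 0 (maximum + 1) 1).foldl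
      (fun return_string i =>
        if PySem.Int.mod i 2 ≠ 0 then return_string ++ PySem.Int.toStr i
        else return_string ++ " ") ""
  PySem.Str.strip return_string

-- ===== PORT B =====
def odd_numbers_alt (maximum : Int) : String :=
  PySem.Str.join " " ((PySem.List.pyRange 1 (maximum + 1) 2).map PySem.Int.toStr)

-- ===== PRECONDITION & SPEC =====
def Spec_odd_numbers (maximum : Int) (out : String) : Prop := out = odd_numbers_alt maximum
instance (maximum : Int) (out : String) : Decidable (Spec_odd_numbers maximum out) := by unfold Spec_odd_numbers; infer_instance

-- ===== CLAIM (what is proved, stated in full; the proofs are below) =====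
def Claim_equal_odd_numbers : Prop := ∀ (maximum : Int), Dom_odd_numbers maximum → Spec_odd_numbers maximum (odd_numbers maximum)

-- ===== LEMMAS AND PROOFS =====

-- one chunk appended by A's loop body for index i
def pvPiece (i : Int) : List Char :=
  if PySem.Int.mod i 2 ≠ 0 then PySem.Int.toChars i else [' ']

-- the space-joined odd numbers 1, 3, …, with n odd numbers
def pvJ (n : Nat) : List Char :=
  PySem.Chars.join [' '] ((List.range n).map (fun k : Nat => PySem.Int.toChars (1 + 2 * (k : Int))))

lemma pv_fold (l : List Int) (s : String) :
    (l.foldl (fun return_string i =>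
        if PySem.Int.mod i 2 ≠ 0 then return_string ++ PySem.Int.toStr i
        else return_string ++ " ") s).toList
      = s.toList ++ l.flatMap pvPiece := by
  induction l generalizing s with
  | nil => simp
  | cons a t ih =>
    rw [List.foldl_cons, ih, List.flatMap_cons]
    unfold pvPiece
    split_ifs with h
    · simp [PySem.Int.toList_toStr]
    · simp

lemma pv_range_odd (n : Nat) :
    PySem.List.pyRange 1 ((n : Int) + 1) 2
      = (List.range ((n + 1) / 2)).map (fun k : Nat => (1 + 2 * (k : Int))) := by
  rw [PySem.List.pyRange_of_pos 1 ((n : Int) + 1) (by norm_num)]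
  have h : (if (1:Int) < (n : Int) + 1 then (((n : Int) + 1 - 1 + 2 - 1) / 2).toNat else 0) = (n + 1) / 2 := by
    split_ifs with h <;> omega
  rw [h]

lemma pv_join_app (L : List (List Char)) (x : List Char) :
    PySem.Chars.join [' '] (L ++ [x])
      = (if L = [] then [] else PySem.Chars.join [' '] L ++ [' ']) ++ x := by
  induction L with
  | nil => simp [PySem.Chars.join_singleton]
  | cons a t ih =>
    cases t with
    | nil => simp [PySem.Chars.join_cons_cons, PySem.Chars.join_singleton]
    | cons b u =>
      have ih' : PySem.Chars.join [' '] (b :: (u ++ [x]))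
          = (if (b :: u) = [] then [] else PySem.Chars.join [' '] (b :: u) ++ [' ']) ++ x := by
        rw [← List.cons_append]; exact ih
      simp only [List.cons_append, PySem.Chars.join_cons_cons, ih']
      simp

lemma pv_join_head (x : List Char) (L : List (List Char)) (sep : List Char) :
    ∃ r, PySem.Chars.join sep (x :: L) = x ++ r := by
  cases L with
  | nil => exact ⟨[], by simp [PySem.Chars.join_singleton]⟩
  | cons b u => exact ⟨sep ++ PySem.Chars.join sep (b :: u), by simp [PySem.Chars.join_cons_cons]⟩

set_option maxHeartbeats 1000000 in
lemma pv_digitChar (m : Nat) : PySem.Chars.isspace (Nat.digitChar m) = false := by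
  by_cases h : m < 16
  · interval_cases m <;> decide
  · have hstar : Nat.digitChar m = '*' := by
      unfold Nat.digitChar
      rw [if_neg (by omega), if_neg (by omega), if_neg (by omega), if_neg (by omega),
        if_neg (by omega), if_neg (by omega), if_neg (by omega), if_neg (by omega),
        if_neg (by omega), if_neg (by omega), if_neg (by omega), if_neg (by omega),
        if_neg (by omega), if_neg (by omega), if_neg (by omega), if_neg (by omega)]
    rw [hstar]
    decide

lemma pv_toDigitsCore (f : Nat) : ∀ (n : Nat) (acc : List Char),
    ∃ ds, Nat.toDigitsCore 10 f n acc = ds ++ acc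
      ∧ (∀ c ∈ ds, PySem.Chars.isspace c = false) ∧ (0 < f → ds ≠ []) := by
  induction f with
  | zero => exact fun n acc => ⟨[], rfl, by simp, by omega⟩
  | succ f ih =>
    intro n acc
    rw [Nat.toDigitsCore]
    by_cases h : n / 10 = 0
    · simp only [h]
      exact ⟨[(n % 10).digitChar], rfl, by simpa using pv_digitChar (n % 10), by simp⟩
    · simp only [if_neg h]
      obtain ⟨ds, he, hs, _⟩ := ih (n / 10) ((n % 10).digitChar :: acc)
      refine ⟨ds ++ [(n % 10).digitChar], by simpa using he, ?_, by simp⟩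
      intro c hc
      rcases List.mem_append.mp hc with h1 | h1
      · exact hs c h1
      · simp at h1; subst h1; exact pv_digitChar _

lemma pv_toChars_odd (k : Nat) :
    ∃ ds, PySem.Int.toChars (1 + 2 * (k : Int)) = ds
      ∧ (∀ c ∈ ds, PySem.Chars.isspace c = false) ∧ ds ≠ [] := by
  have hnn : ¬ ((1 + 2 * (k : Int)) < 0) := by omega
  obtain ⟨ds, he, hs, hne⟩ := pv_toDigitsCore ((1 + 2 * (k : Int)).toNat + 1) (1 + 2 * (k : Int)).toNat []
  refine ⟨ds, ?_, hs, hne (by omega)⟩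
  simp [PySem.Int.toChars, hnn, Nat.toDigits]
  simpa using he

lemma pv_J_head (m : Nat) : ∃ r, pvJ (m + 1) = '1' :: r := by
  unfold pvJ
  rw [List.range_succ_eq_map]
  simp only [List.map_cons]
  obtain ⟨r, hr⟩ := pv_join_head (PySem.Int.toChars (1 + 2 * ((0 : Nat) : Int)))
    ((List.map Nat.succ (List.range m)).map (fun k : Nat => PySem.Int.toChars (1 + 2 * (k : Int)))) [' ']
  refine ⟨r, ?_⟩
  rw [hr]
  norm_num
  have h1 : PySem.Int.toChars 1 = ['1'] := by decide
  rw [h1]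
  rfl

lemma pv_J_last (m : Nat) :
    ∃ q c, pvJ (m + 1) = q ++ [c] ∧ PySem.Chars.isspace c = false := by
  unfold pvJ
  rw [List.range_succ, List.map_append, List.map_singleton, pv_join_app]
  obtain ⟨ds, he, hs, hne⟩ := pv_toChars_odd m
  obtain ⟨q', c, hq⟩ := (List.eq_nil_or_concat ds).resolve_left hne
  rw [List.concat_eq_append] at hq
  refine ⟨(if (List.range m).map (fun k : Nat => PySem.Int.toChars (1 + 2 * (k : Int))) = [] then []
    else PySem.Chars.join [' '] ((List.range m).map (fun k : Nat => PySem.Int.toChars (1 + 2 * (k : Int)))) ++ [' ']) ++ q', c, ?_, ?_⟩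
  · rw [he, hq, List.append_assoc]
  · exact hs c (by rw [hq]; simp)

lemma pv_lstrip_space (xs : List Char) :
    PySem.Chars.lstrip (' ' :: xs) = PySem.Chars.lstrip xs := by
  simp [PySem.Chars.lstrip, show PySem.Chars.isspace ' ' = true from rfl]

lemma pv_lstrip_nonspace (c : Char) (xs : List Char) (h : PySem.Chars.isspace c = false) :
    PySem.Chars.lstrip (c :: xs) = c :: xs := by
  simp [PySem.Chars.lstrip, h]

lemma pv_rstrip_space (xs : List Char) :
    PySem.Chars.rstrip (xs ++ [' ']) = PySem.Chars.rstrip xs := by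
  simp [PySem.Chars.rstrip, show PySem.Chars.isspace ' ' = true from rfl]

lemma pv_rstrip_nonspace (q : List Char) (c : Char) (h : PySem.Chars.isspace c = false) :
    PySem.Chars.rstrip (q ++ [c]) = q ++ [c] := by
  simp [PySem.Chars.rstrip, h]

lemma pv_strip_form (m : Nat) (T : List Char) (hT : T = [] ∨ T = [' ']) :
    PySem.Chars.strip (' ' :: (pvJ m ++ T)) = pvJ m := by
  cases m with
  | zero =>
    have h0 : pvJ 0 = [] := by simp [pvJ, PySem.Chars.join_nil]
    rcases hT with h | h <;> subst h <;> simp [h0] <;> decide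
  | succ m =>
    obtain ⟨r, hr⟩ := pv_J_head m
    obtain ⟨q, c, hq, hc⟩ := pv_J_last m
    unfold PySem.Chars.strip
    rw [pv_lstrip_space]
    rw [show pvJ (m + 1) ++ T = '1' :: (r ++ T) by rw [hr]; simp]
    rw [pv_lstrip_nonspace _ _ (by decide)]
    rw [show ('1' : Char) :: (r ++ T) = pvJ (m + 1) ++ T by rw [hr]; simp]
    rcases hT with h | h <;> subst h
    · simpa using by rw [hq]; exact pv_rstrip_nonspace q c hc
    · rw [show pvJ (m + 1) ++ [' '] = (pvJ (m + 1)) ++ [' '] from rfl, pv_rstrip_space]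
      rw [hq]; exact pv_rstrip_nonspace q c hc

lemma pv_mod2 (i : Int) : PySem.Int.mod i 2 = i % 2 := by
  simp [PySem.Int.mod, Int.fmod_eq_emod]

lemma pv_core (n : Nat) :
    (PySem.List.pyRange 0 ((n : Int) + 1) 1).flatMap pvPiece
      = ' ' :: (pvJ ((n + 1) / 2) ++ (if n % 2 = 0 ∧ n ≠ 0 then [' '] else [])) := by
  induction n with
  | zero => decide
  | succ n ih =>
    have hstep : PySem.List.pyRange 0 (((n : Int) + 1) + 1) 1
        = PySem.List.pyRange 0 ((n : Int) + 1) 1 ++ [(n : Int) + 1] := by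
      exact PySem.List.pyRange_one_succ_right (by omega)
    push_cast
    rw [hstep, List.flatMap_append, ih]
    simp only [List.flatMap_cons, List.flatMap_nil, List.append_nil]
    by_cases hpar : n % 2 = 0
    · -- n even, n+1 odd: piece is the number itself
      have hpiece : pvPiece ((n : Int) + 1) = PySem.Int.toChars ((n : Int) + 1) := by
        unfold pvPiece
        rw [pv_mod2]
        simp only [ne_eq, ite_not]
        rw [if_neg (by omega)]
      rw [hpiece]
      have h2 : (n + 1 + 1) / 2 = (n + 1) / 2 + 1 := by omega
      have h3 : (n + 1) / 2 = n / 2 := by omega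
      have hif : ¬ ((n + 1) % 2 = 0 ∧ n + 1 ≠ 0) := by omega
      rw [if_neg hif, h2]
      unfold pvJ
      rw [List.range_succ, List.map_append, List.map_singleton, pv_join_app]
      have hval : (1 + 2 * (((n + 1) / 2 : Nat) : Int)) = (n : Int) + 1 := by omega
      rw [hval]
      by_cases hn0 : n = 0
      · subst hn0; simp
      · have hifn : (n % 2 = 0 ∧ n ≠ 0) := ⟨hpar, hn0⟩
        rw [if_pos hifn]
        have hLne : (List.range ((n + 1) / 2)).map (fun k : Nat => PySem.Int.toChars (1 + 2 * (k : Int))) ≠ [] := by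
          simp [List.map_eq_nil_iff, List.range_eq_nil]
          omega
        rw [if_neg hLne]
        simp
    · -- n odd, n+1 even: piece is a space
      have hpiece : pvPiece ((n : Int) + 1) = [' '] := by
        unfold pvPiece
        rw [pv_mod2]
        simp only [ne_eq, ite_not]
        rw [if_pos (by omega)]
      rw [hpiece]
      have h2 : (n + 1 + 1) / 2 = (n + 1) / 2 := by omega
      have hifn : ¬ (n % 2 = 0 ∧ n ≠ 0) := by omega
      have hify : ((n + 1) % 2 = 0 ∧ n + 1 ≠ 0) := by omega
      rw [if_neg hifn, if_pos hify, h2]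
      simp

lemma pv_alt_toList (n : Nat) :
    (odd_numbers_alt ((n : Int))).toList = pvJ ((n + 1) / 2) := by
  unfold odd_numbers_alt
  rw [PySem.Str.toList_join]
  rw [pv_range_odd, List.map_map, List.map_map]
  unfold pvJ
  have hsep : (" " : String).toList = [' '] := rfl
  rw [hsep]
  congr 1
  apply List.map_congr_left
  intro k _
  simp [Function.comp, PySem.Int.toList_toStr]

-- ===== VERDICT (by name: the statement is the Claim_ definition above) =====
theorem odd_numbers_spec : Claim_equal_odd_numbers := by
  intro maximum _
  unfold Spec_odd_numbers
  rw [← String.toList_inj]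
  rcases lt_or_ge maximum 0 with hneg | hpos
  · -- maximum < 0 : both sides are empty
    unfold odd_numbers odd_numbers_alt
    rw [PySem.List.pyRange_one_eq_nil (by omega)]
    rw [PySem.List.pyRange_of_pos 1 (maximum + 1) (by norm_num), if_neg (by omega)]
    simp only [List.foldl_nil, PySem.Str.toList_strip, PySem.Str.toList_join]
    decide
  · obtain ⟨n, rfl⟩ := Int.eq_ofNat_of_zero_le hpos
    rw [pv_alt_toList]
    unfold odd_numbers
    rw [PySem.Str.toList_strip, pv_fold, pv_core]
    simp only [String.toList_empty, List.nil_append]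
    exact pv_strip_form _ _ (by split_ifs <;> simp)
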